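-- pv_equiv track=rewrite | github.com/towaanu/python-school | python_school/tictactoe.py | check_plays
-- ===== SOURCE A (Python) =====
-- def check_plays(plays):
--     current_play = plays[0]
--
--     if current_play == " ":
--         return None
--
--     i = 1
--     while i < len(plays) and plays[i] == current_play:
--         i += 1
--
--     if i == len(plays):
--         return current_play
-- ===== SOURCE B (Python) =====
-- def check_plays(plays):
--     current_play = plays[0]
--     if current_play == " ":
--         return None
--     if len(set(plays)) == 1:
--         return current_play
--     return None
-- ===== Notes on version B (the rewrite author's own statement) =====
-- stated objective: simpler
-- what changed: The index-cursor while-loop with early exit is replaced by a one-shot uniqueness test: build the set of all plays and return the first play iff the set has exactly one element.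
import Mathlib
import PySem

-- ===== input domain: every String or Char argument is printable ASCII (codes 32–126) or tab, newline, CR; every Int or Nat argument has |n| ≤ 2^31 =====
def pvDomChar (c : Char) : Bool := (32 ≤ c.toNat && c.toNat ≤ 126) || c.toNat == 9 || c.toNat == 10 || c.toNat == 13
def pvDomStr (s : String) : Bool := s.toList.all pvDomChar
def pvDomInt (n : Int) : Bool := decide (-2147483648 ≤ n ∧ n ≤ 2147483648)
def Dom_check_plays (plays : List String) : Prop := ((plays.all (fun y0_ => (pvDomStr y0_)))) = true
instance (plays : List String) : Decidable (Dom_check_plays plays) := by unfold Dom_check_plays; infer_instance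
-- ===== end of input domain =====

-- B replaces A's index-cursor while-loop by a one-shot set-uniqueness test (objective: simpler).
-- Pre_ excludes the empty list, on which both Pythons raise IndexError at plays[0].


-- ===== PORT A =====
-- the 'while i < len(plays) and plays[i] == current_play: i += 1' loop, returning the final i
def check_plays_loop (plays : List String) (cur : String) (i : Nat) : Nat :=
  if h : i < plays.length then
    if plays[i] = cur then check_plays_loop plays cur (i + 1) else i
  else i
  termination_by plays.length - i

def check_plays (plays : List String) : Option String :=
  match PySem.List.pyGet? plays 0 with
  | none => none    -- plays[0] raises IndexError; excluded by Pre_check_plays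
  | some current_play =>
    if current_play = " " then none
    else
      let i := check_plays_loop plays current_play 1
      if i = plays.length then some current_play else none

-- ===== PORT B =====
def check_plays_alt (plays : List String) : Option String :=
  match PySem.List.pyGet? plays 0 with
  | none => none    -- plays[0] raises IndexError; excluded by Pre_check_plays
  | some current_play =>
    if current_play = " " then none
    else if PySem.Set.len (PySem.Set.ofList plays) = 1 then some current_play
    else none

-- ===== PRECONDITION & SPEC =====
-- Pre_ excludes exactly the empty list, on which A raises IndexError at plays[0].
def Pre_check_plays (plays : List String) : Prop := 0 < plays.length
instance (plays : List String) : Decidable (Pre_check_plays plays) := by unfold Pre_check_plays; infer_instance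
def pvWitness_check_plays : List String := ["X", "X"]
def Spec_check_plays (plays : List String) (out : Option String) : Prop := out = check_plays_alt plays
instance (plays : List String) (out : Option String) : Decidable (Spec_check_plays plays out) := by unfold Spec_check_plays; infer_instance

-- ===== CLAIM (what is proved, stated in full; the proofs are below) =====
def Claim_equal_check_plays : Prop := ∀ (plays : List String), Dom_check_plays plays → Pre_check_plays plays → Spec_check_plays plays (check_plays plays)

-- ===== LEMMAS AND PROOFS =====

-- A's while-loop hits len(plays) iff every element from index i on equals cur
theorem check_plays_loop_iff (plays : List String) (cur : String) :
    ∀ k i, plays.length ≤ i + k → i ≤ plays.length →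
      (check_plays_loop plays cur i = plays.length ↔ ∀ x ∈ plays.drop i, x = cur) := by
  intro k
  induction k with
  | zero =>
    intro i h1 h2
    have hi : i = plays.length := by omega
    subst hi
    unfold check_plays_loop
    simp
  | succ k ih =>
    intro i h1 h2
    rcases Nat.lt_or_ge i plays.length with hlt | hge
    · unfold check_plays_loop
      rw [List.drop_eq_getElem_cons hlt]
      by_cases hx : plays[i] = cur
      · simp only [hlt, hx, if_pos, dif_pos]
        rw [ih (i + 1) (by omega) (by omega)]
        simp
      · rw [dif_pos hlt, if_neg hx]
        constructor
        · intro h; omega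
        · intro h; exact absurd (h plays[i] List.mem_cons_self) hx
    · have hi : i = plays.length := by omega
      subst hi
      unfold check_plays_loop
      simp

-- set(plays) is a singleton iff every element equals the head
theorem ofList_len_one_iff (p : String) (rest : List String) :
    PySem.Set.len (PySem.Set.ofList (p :: rest)) = 1 ↔ ∀ x ∈ rest, x = p := by
  have hd : PySem.Set.discard (PySem.Set.ofList rest) p = [] ↔ ∀ x ∈ rest, x = p := by
    rw [List.eq_nil_iff_forall_not_mem]
    constructor
    · intro h x hx
      by_contra hne
      exact h x (by simp [PySem.Set.mem_discard, PySem.Set.mem_ofList, hx, hne])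
    · intro h x hx
      simp only [PySem.Set.mem_discard, PySem.Set.mem_ofList] at hx
      exact hx.2 (h x hx.1)
  rw [PySem.Set.ofList_cons]
  simp only [PySem.Set.len, List.length_cons]
  constructor
  · intro h
    exact hd.mp (List.eq_nil_of_length_eq_zero (by omega))
  · intro h
    rw [hd.mpr h]
    rfl

-- ===== VERDICT (by name: the statement is the Claim_ definition above) =====
theorem check_plays_spec : Claim_equal_check_plays := by
  intro plays _ hpre
  unfold Spec_check_plays check_plays check_plays_alt
  match plays with
  | [] => exact absurd hpre (by simp [Pre_check_plays])
  | p :: rest =>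
    rw [PySem.List.pyGet?_zero_cons]
    dsimp only
    by_cases hsp : p = " "
    · simp [hsp]
    · rw [if_neg hsp, if_neg hsp]
      have hA := check_plays_loop_iff (p :: rest) p (p :: rest).length 1 (by omega) (by simp)
      have hB := ofList_len_one_iff p rest
      simp only [List.drop_one, List.tail_cons] at hA
      by_cases hall : ∀ x ∈ rest, x = p
      · rw [if_pos (hA.mpr hall), if_pos (hB.mpr hall)]
      · rw [if_neg (fun hc => hall (hA.mp hc)), if_neg (fun hc => hall (hB.mp hc))]
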